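-- pv_equiv track=rewrite | github.com/sineretsony/test2 | FILTERS.py | get_last_number_in_name
-- ===== SOURCE A (Python) =====
-- def get_last_number_in_name(name):
--     parts = name.split()
--     last_number = None
--     for part in reversed(parts):
--         if any(char.isdigit() for char in part):
--             last_number = part
--             break
--     if last_number:
--         return int(''.join(filter(str.isdigit, last_number)))
--     return 0
-- ===== SOURCE B (Python) =====
-- def get_last_number_in_name(name):
--     result = 0
--     for token in name.split():
--         digits = ''.join(c for c in token if c.isdigit())
--         if digits:
--             result = int(digits)
--     return result
-- ===== Notes on version B (the rewrite author's own statement) =====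
-- stated objective: simpler
-- what changed: Single forward pass with last-wins accumulation: each token's digits are extracted immediately and overwrite the result, replacing A's reverse scan with break followed by a separate extraction pass.
import Mathlib
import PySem

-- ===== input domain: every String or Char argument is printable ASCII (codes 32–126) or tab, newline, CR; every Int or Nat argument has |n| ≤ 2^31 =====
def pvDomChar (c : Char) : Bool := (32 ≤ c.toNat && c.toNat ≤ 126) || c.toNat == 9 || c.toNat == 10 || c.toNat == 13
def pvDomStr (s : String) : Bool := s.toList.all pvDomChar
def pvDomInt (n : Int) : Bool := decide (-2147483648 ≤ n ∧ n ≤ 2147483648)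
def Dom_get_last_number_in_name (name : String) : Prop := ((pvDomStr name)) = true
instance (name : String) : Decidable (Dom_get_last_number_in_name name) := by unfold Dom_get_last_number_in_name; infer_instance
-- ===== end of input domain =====

-- B: one forward pass over the words with last-wins accumulation, replacing A's
-- reverse scan + break + separate digit-extraction pass (objective: simpler).

-- ===== PORT A =====
-- 'for part in reversed(parts): if any(char.isdigit() for char in part): last_number = part; break'
def pvFindA : List String → Option String
  | [] => none
  | p :: rest => if p.toList.any PySem.Chars.isdigit then some p else pvFindA rest

-- int(''.join(filter(str.isdigit, last_number))); the argument is a nonempty digit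
-- string here, so int() never raises and ofStr? is always some (getD 0 unreachable)
def pvIntOfDigits (s : String) : Int :=
  (PySem.Int.ofStr? (String.ofList (s.toList.filter PySem.Chars.isdigit))).getD 0

def get_last_number_in_name (name : String) : Int :=
  let parts := PySem.Str.split₀ name
  match pvFindA parts.reverse with
  | some last_number =>
      if last_number ≠ "" then pvIntOfDigits last_number else 0  -- 'if last_number:'
  | none => 0

-- ===== PORT B =====
def get_last_number_in_name_alt (name : String) : Int :=
  (PySem.Str.split₀ name).foldl
    (fun result token =>
      let digits := token.toList.filter PySem.Chars.isdigit
      -- int(digits): nonempty all-digit string, int() never raises (getD 0 unreachable)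
      if digits ≠ [] then (PySem.Int.ofStr? (String.ofList digits)).getD 0 else result)
    0

-- ===== PRECONDITION & SPEC =====
def Spec_get_last_number_in_name (name : String) (out : Int) : Prop := out = get_last_number_in_name_alt name
instance (name : String) (out : Int) : Decidable (Spec_get_last_number_in_name name out) := by unfold Spec_get_last_number_in_name; infer_instance

-- ===== CLAIM (what is proved, stated in full; the proofs are below) =====
def Claim_equal_get_last_number_in_name : Prop := ∀ (name : String), Dom_get_last_number_in_name name → Spec_get_last_number_in_name name (get_last_number_in_name name)

-- ===== LEMMAS AND PROOFS =====

theorem pv_filter_ne_nil_iff_any (p : Char → Bool) (l : List Char) :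
    (l.filter p ≠ [] ) ↔ l.any p = true := by
  simp [List.filter_eq_nil_iff, List.any_eq_true]

theorem pv_key (L : List String) :
    (L.foldl
      (fun result token =>
        let digits := token.toList.filter PySem.Chars.isdigit
        if digits ≠ [] then (PySem.Int.ofStr? (String.ofList digits)).getD 0 else result)
      0 : Int)
    = match pvFindA L.reverse with
      | some last_number => if last_number ≠ "" then pvIntOfDigits last_number else 0
      | none => 0 := by
  induction L using List.reverseRecOn with
  | nil => simp [pvFindA]
  | append_singleton L t ih =>
    rw [List.foldl_append, List.reverse_append]
    simp only [List.foldl_cons, List.foldl_nil, List.reverse_singleton,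
      List.singleton_append, pvFindA]
    by_cases h : t.toList.any PySem.Chars.isdigit = true
    · have hf : t.toList.filter PySem.Chars.isdigit ≠ [] :=
        (pv_filter_ne_nil_iff_any _ _).mpr h
      have ht : t ≠ "" := by
        intro he; subst he
        simp at h
      simp only [h, if_pos, hf, ne_eq, not_false_iff, ht, pvIntOfDigits]
    · have hf : t.toList.filter PySem.Chars.isdigit = [] := by
        by_contra hc
        exact h ((pv_filter_ne_nil_iff_any _ _).mp hc)
      simp only [h, hf, ne_eq, not_true, if_false]
      simpa using ih

-- ===== VERDICT (by name: the statement is the Claim_ definition above) =====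
theorem get_last_number_in_name_spec : Claim_equal_get_last_number_in_name := by
  intro name _
  unfold Spec_get_last_number_in_name get_last_number_in_name get_last_number_in_name_alt
  exact (pv_key (PySem.Str.split₀ name)).symm
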